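-- pv_equiv track=rewrite | github.com/Zeon-Code/qapi | parser.py | _segment_key
-- ===== SOURCE A (Python) =====
-- def _segment_key(key):
--     raw = key
--     segments = []
--
--     while raw:
--         match_index = raw.find("[", 1)
--         if match_index > 0:
--             segments.append(raw[:match_index])
--             raw = raw[match_index:]
--             continue
--
--         segments.append(raw)
--         raw = ""
--     return segments
-- ===== SOURCE B (Python) =====
-- def _segment_key(key):
--     segments = []
--     cur = ""
--     for ch in key:
--         if ch == "[" and cur:
--             segments.append(cur)
--             cur = ""
--         cur += ch
--     if cur:
--         segments.append(cur)
--     return segments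
-- ===== Notes on version B (the rewrite author's own statement) =====
-- stated objective: alternative
-- what changed: A repeatedly calls str.find on a shrinking suffix and slices it off; B is a single left-to-right pass over the characters maintaining a current-segment accumulator that is flushed at each non-leading '['.
import Mathlib
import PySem

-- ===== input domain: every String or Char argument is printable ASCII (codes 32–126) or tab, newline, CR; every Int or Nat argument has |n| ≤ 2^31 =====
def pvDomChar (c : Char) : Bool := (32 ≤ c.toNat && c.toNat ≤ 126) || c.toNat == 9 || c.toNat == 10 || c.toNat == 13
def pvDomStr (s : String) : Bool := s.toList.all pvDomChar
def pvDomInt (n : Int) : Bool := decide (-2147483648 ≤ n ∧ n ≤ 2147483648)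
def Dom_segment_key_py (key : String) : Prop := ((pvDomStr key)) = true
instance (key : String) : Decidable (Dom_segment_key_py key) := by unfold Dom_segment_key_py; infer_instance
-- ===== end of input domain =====

-- B replaces A's find-on-a-shrinking-suffix-and-slice loop by a single accumulator pass over the characters (objective: alternative decomposition).

-- ===== PORT A =====
-- A's while loop over the shrinking string `raw`, on the code-point list (PySem string
-- primitives are defined on List Char); raw.find("[", 1) = Chars.findFrom raw ['['] 1,
-- raw[:m] / raw[m:] = PySem.List.slice.
def segCharsA (raw : List Char) : List (List Char) :=
  if h : raw = [] then []
  else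
    let m := PySem.Chars.findFrom raw ['['] 1 none
    if hm : m > 0 then
      PySem.List.slice raw none (some m) :: segCharsA (PySem.List.slice raw (some m) none)
    else [raw]
termination_by raw.length
decreasing_by
  have h1 : 1 ≤ raw.length := by
    cases raw with
    | nil => exact absurd rfl h
    | cons a t => simp
  have hm' : (0:Int) < PySem.Chars.findFrom raw ['['] 1 none := hm
  simp only [PySem.List.slice_some_none, List.length_drop]
  have h3 : 1 ≤ PySem.List.clampIdx raw.length (PySem.Chars.findFrom raw ['['] 1 none) := by
    simp only [PySem.List.clampIdx]; split_ifs <;> omega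
  have h2 : PySem.List.clampIdx raw.length (PySem.Chars.findFrom raw ['['] 1 none) ≤ raw.length :=
    PySem.List.clampIdx_le _ _
  omega

def segment_key_py (key : String) : List String :=
  (segCharsA key.toList).map String.ofList

-- ===== PORT B =====
-- B's loop body: flush the current segment at a '[' that is not the first character.
def stepB (st : List (List Char) × List Char) (ch : Char) : List (List Char) × List Char :=
  if ch = '[' ∧ st.2 ≠ [] then (st.1 ++ [st.2], [ch]) else (st.1, st.2 ++ [ch])

def segment_key_py_alt (key : String) : List String :=
  let st := key.toList.foldl stepB ([], [])
  (if st.2 ≠ [] then st.1 ++ [st.2] else st.1).map String.ofList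

-- ===== PRECONDITION & SPEC =====
def Spec_segment_key_py (key : String) (out : List String) : Prop := out = segment_key_py_alt key
instance (key : String) (out : List String) : Decidable (Spec_segment_key_py key out) := by unfold Spec_segment_key_py; infer_instance

-- ===== CLAIM (what is proved, stated in full; the proofs are below) =====
def Claim_equal_segment_key_py : Prop := ∀ (key : String), Dom_segment_key_py key → Spec_segment_key_py key (segment_key_py key)

-- ===== LEMMAS AND PROOFS =====

-- `find.go` on a list whose first '[' sits right after a bracket-free prefix p returns k + p.length.
theorem go_first (q : List Char) : ∀ (p : List Char) (k : Nat), '[' ∉ p →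
    PySem.Chars.find.go ['['] (p ++ '[' :: q) k = ((k : Int) + p.length) := by
  intro p
  induction p with
  | nil => intro k _; simp [PySem.Chars.find.go, List.isPrefixOf]
  | cons c t ih =>
      intro k hc
      simp only [List.mem_cons, not_or] at hc
      rw [List.cons_append, PySem.Chars.find.go]
      have : List.isPrefixOf ['['] (c :: (t ++ '[' :: q)) = false := by
        simp [List.isPrefixOf, hc.1]
      rw [this]
      simp only [Bool.false_eq_true, if_false]
      rw [ih (k+1) hc.2]
      simp [List.length_cons]; ring

theorem find_first (p q : List Char) (hp : '[' ∉ p) :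
    PySem.Chars.find (p ++ '[' :: q) ['['] = (p.length : Int) := by
  simpa [PySem.Chars.find] using go_first q p 0 hp

theorem find_none (t : List Char) (ht : '[' ∉ t) :
    PySem.Chars.find t ['['] = -1 := by
  rw [PySem.Chars.find_eq_neg_one_iff]
  rw [List.singleton_infix_iff]
  exact ht

-- A on a bracket-free-after-head nonempty segment alone: one segment.
theorem segA_nosplit (cur : List Char) (h : cur ≠ []) (ht : '[' ∉ cur.tail) :
    segCharsA cur = [cur] := by
  cases cur with
  | nil => exact absurd rfl h
  | cons c t =>
      rw [segCharsA.eq_def]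
      simp only [reduceCtorEq, dite_false]
      have hf : PySem.Chars.findFrom (c :: t) ['['] 1 none = -1 := by
        have h1 : (1 : Nat) ≤ (c :: t).length := by simp
        have := PySem.Chars.findFrom_natCast (c :: t) ['['] 1 h1
        simp only [Nat.cast_one] at this
        rw [this]
        simp only [List.drop_one, List.tail_cons]
        rw [find_none t (by simpa using ht)]
        simp
      rw [hf]
      norm_num

-- A on cur ++ '['::rest, cur nonempty and bracket-free after its head: peel off cur.
theorem segA_split (cur rest : List Char) (h : cur ≠ []) (ht : '[' ∉ cur.tail) :
    segCharsA (cur ++ '[' :: rest) = cur :: segCharsA ('[' :: rest) := by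
  cases cur with
  | nil => exact absurd rfl h
  | cons c t =>
      rw [segCharsA.eq_def]
      simp only [List.cons_append, reduceCtorEq, dite_false]
      have h1 : (1 : Nat) ≤ (c :: (t ++ '[' :: rest)).length := by simp
      have hf : PySem.Chars.findFrom (c :: (t ++ '[' :: rest)) ['['] 1 none
          = ((c :: t).length : Int) := by
        have := PySem.Chars.findFrom_natCast (c :: (t ++ '[' :: rest)) ['['] 1 h1
        simp only [Nat.cast_one] at this
        rw [this]
        simp only [List.drop_one, List.tail_cons]
        rw [find_first t rest (by simpa using ht)]
        simp [List.length_cons]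
        ring
      rw [hf]
      have hpos : ((c :: t).length : Int) > 0 := by simp
      rw [dif_pos hpos]
      rw [PySem.List.slice_to_natCast, PySem.List.slice_from_natCast]
      have e1 : (c :: (t ++ '[' :: rest)) = (c :: t) ++ '[' :: rest := by simp
      rw [e1, List.take_left, List.drop_left]

-- Invariant of B's fold: a nonempty current segment with no bracket after its head.
theorem foldB_inv (xs : List Char) : ∀ (segs : List (List Char)) (cur : List Char),
    cur ≠ [] → '[' ∉ cur.tail →
    (let st := xs.foldl stepB (segs, cur)
     if st.2 ≠ [] then st.1 ++ [st.2] else st.1) = segs ++ segCharsA (cur ++ xs) := by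
  induction xs with
  | nil =>
      intro segs cur h ht
      simp only [List.foldl_nil, List.append_nil]
      rw [segA_nosplit cur h ht, if_pos h]
  | cons x xs ih =>
      intro segs cur h ht
      simp only [List.foldl_cons]
      by_cases hx : x = '['
      · subst hx
        rw [show stepB (segs, cur) '[' = (segs ++ [cur], ['[']) by
          simp [stepB, h]]
        rw [ih (segs ++ [cur]) ['['] (by simp) (by simp)]
        rw [segA_split cur xs h ht]
        simp
      · rw [show stepB (segs, cur) x = (segs, cur ++ [x]) by
          simp only [stepB]; rw [if_neg (fun hc => hx hc.1)]]
        rw [ih segs (cur ++ [x]) (by simp) (by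
          cases cur with
          | nil => exact absurd rfl h
          | cons c t => simp_all [Ne.symm hx])]
        simp

theorem segChars_eq (cs : List Char) :
    segCharsA cs =
      (let st := cs.foldl stepB ([], [])
       if st.2 ≠ [] then st.1 ++ [st.2] else st.1) := by
  cases cs with
  | nil => rw [segCharsA.eq_def]; simp
  | cons c t =>
      simp only [List.foldl_cons]
      rw [show stepB ([], []) c = ([], [c]) by simp [stepB]]
      rw [foldB_inv t [] [c] (by simp) (by simp)]
      simp

-- ===== VERDICT (by name: the statement is the Claim_ definition above) =====
theorem segment_key_py_spec : Claim_equal_segment_key_py := by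
  intro key _
  unfold Spec_segment_key_py segment_key_py segment_key_py_alt
  rw [segChars_eq key.toList]
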